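-- pv_equiv track=rewrite | github.com/PeteMango/Contest | LeetCode/Contests/B/B131/3160.py | queryResults
-- ===== SOURCE A (Python) =====
-- from typing import List
-- from collections import defaultdict
--
-- def queryResults(limit: int, queries: List[List[int]]) -> List[int]:
--     d = defaultdict(list)
--     l = defaultdict(int)
--     ret = [0] * len(queries)
--
--     for i, q in enumerate(queries):
--         x, y = q[0], q[1]
--         if x not in l:
--             d[y].append(x)
--             l[x] = y
--             ret[i] = len(d)
--             continue
--
--         cur = l[x]
--         # has color
--         if len(d[cur]) == 1:
--             del d[cur]
--             l[x] = y
--             d[y].append(x)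
--             ret[i] = len(d)
--
--         # more than one color
--         else:
--             d[cur].remove(x)
--             l[x] = y
--             d[y].append(x)
--             ret[i] = len(d)
--
--     return ret
--
-- queries = [[0,1],[1,2],[2,2],[3,4],[4,5]]
-- ===== SOURCE B (Python) =====
-- def queryResults(limit, queries):
--     color = {}
--     res = []
--     for q in queries:
--         color[q[0]] = q[1]
--         res.append(len(set(color.values())))
--     return res
-- ===== Notes on version B (the rewrite author's own statement) =====
-- stated objective: simpler
-- what changed: A incrementally maintains a color->list-of-balls dict (with list.remove/deletion) and reports its size; B keeps only the ball->color map and recounts len(set(color.values())) from scratch after each query, with no per-color occupancy bookkeeping at all.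
import Mathlib
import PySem

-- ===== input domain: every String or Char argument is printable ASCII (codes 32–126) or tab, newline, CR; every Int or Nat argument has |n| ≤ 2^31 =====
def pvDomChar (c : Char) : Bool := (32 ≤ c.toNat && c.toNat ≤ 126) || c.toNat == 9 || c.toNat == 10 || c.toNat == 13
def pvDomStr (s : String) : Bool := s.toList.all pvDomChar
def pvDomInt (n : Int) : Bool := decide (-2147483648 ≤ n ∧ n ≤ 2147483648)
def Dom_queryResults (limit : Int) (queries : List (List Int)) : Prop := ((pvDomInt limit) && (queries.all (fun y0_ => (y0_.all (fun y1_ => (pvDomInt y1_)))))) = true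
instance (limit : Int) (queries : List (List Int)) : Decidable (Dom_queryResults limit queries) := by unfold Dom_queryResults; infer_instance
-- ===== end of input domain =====

-- B drops A's color→list-of-balls bookkeeping entirely: it keeps only the ball→color map and
-- recounts len(set(color.values())) from scratch after each query; equivalence of the RETURN values is proved.

-- ===== PORT A =====
-- one loop iteration of A: state (d = color → list of balls, l = ball → color, ret), input (i, q)
def stepA (st : PySem.Dict Int (List Int) × PySem.Dict Int Int × List Int)
    (iq : Int × List Int) : PySem.Dict Int (List Int) × PySem.Dict Int Int × List Int :=
  let d := st.1
  let l := st.2.1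
  let ret := st.2.2
  let x := (PySem.List.pyGet? iq.2 0).getD 0   -- q[0]; Pre_ guarantees the index is in range
  let y := (PySem.List.pyGet? iq.2 1).getD 0   -- q[1]
  if l.contains x = false then
    let d' := d.modify y [] (fun L => L ++ [x])
    (d', l.insert x y, ret.set iq.1.toNat (d'.size : Int))
  else
    let cur := l.getD x 0
    if (d.getD cur []).length == 1 then
      let d' := (d.erase cur).modify y [] (fun L => L ++ [x])
      (d', l.insert x y, ret.set iq.1.toNat (d'.size : Int))
    else
      -- d[cur].remove(x): x ∈ d[cur] always holds here, so the .getD fallback is never taken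
      let d' := (d.modify cur [] (fun L => (PySem.List.remove? L x).getD L)).modify y [] (fun L => L ++ [x])
      (d', l.insert x y, ret.set iq.1.toNat (d'.size : Int))

def queryResults (limit : Int) (queries : List (List Int)) : List Int :=
  ((PySem.List.enumerate queries 0).foldl stepA
    (PySem.Dict.empty, PySem.Dict.empty, List.replicate queries.length (0 : Int))).2.2

-- ===== PORT B =====
-- one loop iteration of B: state (color = ball → color, res); append len(set(color.values()))
def stepB (st : PySem.Dict Int Int × List Int) (q : List Int) : PySem.Dict Int Int × List Int :=
  let x := (PySem.List.pyGet? q 0).getD 0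
  let y := (PySem.List.pyGet? q 1).getD 0
  let c := st.1.insert x y
  (c, st.2 ++ [PySem.Set.len (PySem.Set.ofList c.values)])

def queryResults_alt (limit : Int) (queries : List (List Int)) : List Int :=
  (queries.foldl stepB (PySem.Dict.empty, [])).2

-- ===== PRECONDITION & SPEC =====
-- Pre_ excludes exactly the queries shorter than 2 elements, on which Python A raises IndexError at q[1] (or q[0]).
def Pre_queryResults (limit : Int) (queries : List (List Int)) : Prop :=
  ∀ q ∈ queries, 2 ≤ q.length
instance (limit : Int) (queries : List (List Int)) : Decidable (Pre_queryResults limit queries) := by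
  unfold Pre_queryResults; infer_instance

def pvWitness_queryResults : Int × List (List Int) := (5, [[0,1],[1,2],[2,2],[3,4],[4,5]])

def Spec_queryResults (limit : Int) (queries : List (List Int)) (out : List Int) : Prop := out = queryResults_alt limit queries
instance (limit : Int) (queries : List (List Int)) (out : List Int) : Decidable (Spec_queryResults limit queries out) := by unfold Spec_queryResults; infer_instance

-- ===== CLAIM (what is proved, stated in full; the proofs are below) =====
def Claim_equal_queryResults : Prop := ∀ (limit : Int) (queries : List (List Int)), Dom_queryResults limit queries → Pre_queryResults limit queries → Spec_queryResults limit queries (queryResults limit queries)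

-- ===== LEMMAS AND PROOFS =====

-- facts about Dict.erase (erase filters the items list); none are provided by the prelude

theorem pv_find?_filter_key_ne {ν : Type} (l : List (Int × ν)) (k c : Int) (h : c ≠ k) :
    (l.filter (fun p => !(p.1 == k))).find? (fun p => p.1 == c) = l.find? (fun p => p.1 == c) := by
  induction l with
  | nil => rfl
  | cons a t ih =>
    by_cases hak : a.1 = k
    · simp [hak, Ne.symm h, ih]
    · by_cases hac : a.1 = c
      · simp [hac, h]
      · simp [hak, hac, ih]

theorem pv_get?_erase {ν : Type} (d : PySem.Dict Int ν) (k c : Int) :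
    (d.erase k).get? c = if c = k then none else d.get? c := by
  by_cases h : c = k
  · subst h
    simp only [PySem.Dict.erase, PySem.Dict.get?]
    rw [List.find?_eq_none.mpr]
    · rfl
    · intro p hp
      have := List.of_mem_filter hp
      simpa using this
  · simp only [PySem.Dict.erase, PySem.Dict.get?, if_neg h]
    rw [pv_find?_filter_key_ne _ _ _ h]

theorem pv_getD_erase {ν : Type} (d : PySem.Dict Int ν) (k c : Int) (d0 : ν) :
    (d.erase k).getD c d0 = if c = k then d0 else d.getD c d0 := by
  rw [PySem.Dict.getD_eq_get?_getD, pv_get?_erase, PySem.Dict.getD_eq_get?_getD]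
  by_cases h : c = k <;> simp [h]

theorem pv_contains_erase {ν : Type} (d : PySem.Dict Int ν) (k c : Int) :
    (d.erase k).contains c = (!(c == k) && d.contains c) := by
  rw [PySem.Dict.contains_eq_isSome_get?, pv_get?_erase, PySem.Dict.contains_eq_isSome_get?]
  by_cases h : c = k <;> simp [h]

theorem pv_nodup_keys_erase {ν : Type} (d : PySem.Dict Int ν) (k : Int)
    (h : d.keys.Nodup) : (d.erase k).keys.Nodup := by
  have hs : (d.erase k).keys.Sublist d.keys := by
    simp only [PySem.Dict.keys, PySem.Dict.erase]
    exact List.Sublist.map _ List.filter_sublist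
  exact h.sublist hs

-- the simulation invariant between A's state (d, l) and B's state (l): d is exactly the
-- fibration of l by color — d[c] lists (without repetition) the balls l maps to c, nonempty when present
def SimInv (d : PySem.Dict Int (List Int)) (l : PySem.Dict Int Int) : Prop :=
  d.keys.Nodup ∧ l.keys.Nodup ∧
  (∀ c, (d.getD c []).Nodup) ∧
  (∀ c, d.contains c = true → d.getD c [] ≠ []) ∧
  (∀ b c, l.get? b = some c ↔ b ∈ d.getD c [])

-- under the invariant, A's len(d) IS B's len(set(l.values()))
theorem pv_count (d : PySem.Dict Int (List Int)) (l : PySem.Dict Int Int)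
    (h : SimInv d l) : (d.size : Int) = PySem.Set.len (PySem.Set.ofList l.values) := by
  obtain ⟨h1, h2, _, h4, h5⟩ := h
  have hmem : ∀ c, c ∈ d.keys ↔ c ∈ PySem.Set.ofList l.values := by
    intro c
    rw [PySem.Set.mem_ofList, ← PySem.Dict.contains_iff_mem_keys]
    constructor
    · intro hc
      obtain ⟨b, hb⟩ := List.exists_mem_of_ne_nil _ (h4 c hc)
      have hget : l.get? b = some c := (h5 b c).mpr hb
      have hbc : (b, c) ∈ l.items := PySem.Dict.mem_items_of_get?_eq_some l hget
      simp only [PySem.Dict.values, List.mem_map]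
      exact ⟨(b, c), hbc, rfl⟩
    · intro hv
      simp only [PySem.Dict.values, List.mem_map] at hv
      obtain ⟨p, hp, hpc⟩ := hv
      have hget : l.get? p.1 = some p.2 := PySem.Dict.get?_of_mem_items l hp h2
      rw [hpc] at hget
      have hb : p.1 ∈ d.getD c [] := (h5 p.1 c).mp hget
      by_contra hc
      have hc' : d.contains c = false := by simpa using hc
      rw [PySem.Dict.getD_of_not_contains d ([] : List Int) hc'] at hb
      simp at hb
  have hperm : d.keys.Perm (PySem.Set.ofList l.values) :=
    (List.perm_ext_iff_of_nodup h1 (PySem.Set.nodup_ofList _)).mpr hmem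
  have hlen := hperm.length_eq
  simp only [PySem.Dict.keys, List.length_map] at hlen
  simp [PySem.Set.len, PySem.Dict.size, ← hlen]

-- the common tail of every branch: append x to dm[y], set l[x] = y; dm is d with x already removed
theorem pv_tail (dm : PySem.Dict Int (List Int)) (l : PySem.Dict Int Int) (x y : Int)
    (h1 : dm.keys.Nodup) (h2 : l.keys.Nodup)
    (h3 : ∀ c, (dm.getD c []).Nodup)
    (h4 : ∀ c, dm.contains c = true → dm.getD c [] ≠ [])
    (h5 : ∀ b c, b ≠ x → (l.get? b = some c ↔ b ∈ dm.getD c []))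
    (h6 : ∀ c, x ∉ dm.getD c []) :
    SimInv (dm.modify y [] (fun L => L ++ [x])) (l.insert x y) := by
  refine ⟨?_, PySem.Dict.nodup_keys_insert _ _ _ h2, ?_, ?_, ?_⟩
  · rw [show (dm.modify y [] (fun L => L ++ [x])).keys
        = (dm.insert y ((fun L => L ++ [x]) (dm.getD y []))).keys from PySem.Dict.keys_modify ..]
    exact PySem.Dict.nodup_keys_insert _ _ _ h1
  · intro c
    rw [PySem.Dict.getD_modify]
    by_cases hc : c = y
    · rw [if_pos hc]
      refine (h3 y).append (List.nodup_singleton x) ?_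
      intro a ha hax
      simp only [List.mem_singleton] at hax
      subst hax
      exact h6 y ha
    · simp [hc, h3 c]
  · intro c hc
    rw [PySem.Dict.getD_modify]
    by_cases hcy : c = y
    · simp [hcy]
    · rw [PySem.Dict.contains_modify] at hc
      have : dm.contains c = true := by
        rcases Bool.or_eq_true_iff.mp hc with h | h
        · exact absurd (by simpa using h) hcy
        · exact h
      simp [hcy, h4 c this]
  · intro b c
    rw [PySem.Dict.get?_insert, PySem.Dict.getD_modify]
    by_cases hbx : b = x
    · rw [if_pos hbx]
      by_cases hcy : c = y
      · rw [if_pos hcy]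
        simp [hbx, hcy]
      · rw [if_neg hcy]
        simp [hbx, h6 c, Ne.symm hcy]
    · rw [if_neg hbx]
      by_cases hcy : c = y
      · rw [if_pos hcy, hcy, h5 b y hbx]
        simp [hbx]
      · rw [if_neg hcy]
        exact h5 b c hbx

-- one step of A's loop: the new d, the common new l, the emitted value; invariant preserved
theorem pv_step (d : PySem.Dict Int (List Int)) (l : PySem.Dict Int Int) (q : List Int)
    (h : SimInv d l) :
    ∃ d', (∀ (ret : List Int) (i : Int), stepA (d, l, ret) (i, q)
          = (d', l.insert ((PySem.List.pyGet? q 0).getD 0) ((PySem.List.pyGet? q 1).getD 0),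
             ret.set i.toNat (d'.size : Int))) ∧
      SimInv d' (l.insert ((PySem.List.pyGet? q 0).getD 0) ((PySem.List.pyGet? q 1).getD 0)) := by
  obtain ⟨h1, h2, h3, h4, h5⟩ := h
  set x := (PySem.List.pyGet? q 0).getD 0 with hxdef
  set y := (PySem.List.pyGet? q 1).getD 0 with hydef
  by_cases hx : l.contains x = true
  · obtain ⟨cur, hcur⟩ : ∃ cur, l.get? x = some cur := by
      rw [PySem.Dict.contains_eq_isSome_get?] at hx
      exact Option.isSome_iff_exists.mp hx
    have hgetD : l.getD x 0 = cur := by rw [PySem.Dict.getD_eq_get?_getD, hcur]; rfl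
    have hmemx : x ∈ d.getD cur [] := (h5 x cur).mp hcur
    have hxonly : ∀ c, c ≠ cur → x ∉ d.getD c [] := by
      intro c hc hmem
      have := (h5 x c).mpr hmem
      rw [hcur] at this
      exact hc (Option.some.inj this).symm
    by_cases hone : (d.getD cur []).length = 1
    · -- d[cur] = [x]: delete the color cur, then the common tail
      have hsingle : d.getD cur [] = [x] := by
        rcases List.length_eq_one_iff.mp hone with ⟨a, ha⟩
        rw [ha] at hmemx ⊢
        simp at hmemx
        rw [hmemx]
      refine ⟨(d.erase cur).modify y [] (fun L => L ++ [x]), ?_, ?_⟩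
      · intro ret i
        simp only [stepA]
        rw [← hxdef, ← hydef]
        simp [hx, hgetD, hone]
      · refine pv_tail (d.erase cur) l x y (pv_nodup_keys_erase _ _ h1) h2 ?_ ?_ ?_ ?_
        · intro c
          rw [pv_getD_erase]
          by_cases hc : c = cur <;> simp [hc, h3 c]
        · intro c hc
          rw [pv_contains_erase] at hc
          rw [pv_getD_erase]
          rcases Bool.and_eq_true_iff.mp hc with ⟨hne, hcd⟩
          have hne' : c ≠ cur := by simpa using hne
          simp [hne', h4 c hcd]
        · intro b c hbx
          rw [pv_getD_erase]
          by_cases hc : c = cur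
          · rw [if_pos hc]
            simp only [List.not_mem_nil, iff_false]
            intro hget
            have hb := (h5 b c).mp hget
            rw [hc, hsingle] at hb
            simp at hb
            exact hbx hb
          · rw [if_neg hc]
            exact h5 b c
        · intro c
          rw [pv_getD_erase]
          by_cases hc : c = cur
          · simp [hc]
          · simp [hc, hxonly c hc]
    · -- d[cur] keeps other balls: remove x from it, then the common tail
      have hlen1 : 1 ≤ (d.getD cur []).length := List.length_pos_of_mem hmemx
      have hlen2 : 2 ≤ (d.getD cur []).length := by omega
      have hremove : (PySem.List.remove? (d.getD cur []) x).getD (d.getD cur [])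
          = (d.getD cur []).erase x := by
        rw [PySem.List.remove?_eq_some_erase _ _ hmemx]; rfl
      have hlenE : ((d.getD cur []).erase x).length + 1 = (d.getD cur []).length :=
        List.length_erase_add_one hmemx
      refine ⟨(d.modify cur [] (fun L => (PySem.List.remove? L x).getD L)).modify y []
          (fun L => L ++ [x]), ?_, ?_⟩
      · intro ret i
        simp only [stepA]
        rw [← hxdef, ← hydef]
        simp [hx, hgetD, hone]
      · refine pv_tail _ l x y ?_ h2 ?_ ?_ ?_ ?_
        · rw [show (d.modify cur [] (fun L => (PySem.List.remove? L x).getD L)).keys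
              = (d.insert cur _).keys from PySem.Dict.keys_modify ..]
          exact PySem.Dict.nodup_keys_insert _ _ _ h1
        · intro c
          rw [PySem.Dict.getD_modify]
          by_cases hc : c = cur
          · rw [if_pos hc, hremove]
            exact (h3 cur).erase x
          · simp [hc, h3 c]
        · intro c hc
          rw [PySem.Dict.getD_modify]
          rw [PySem.Dict.contains_modify] at hc
          by_cases hc' : c = cur
          · rw [if_pos hc', hremove]
            intro hnil
            have hz : ((d.getD cur []).erase x).length = 0 := by rw [hnil]; rfl
            omega
          · have : d.contains c = true := by
              rcases Bool.or_eq_true_iff.mp hc with h | h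
              · exact absurd (by simpa using h) hc'
              · exact h
            simp [hc', h4 c this]
        · intro b c hbx
          rw [PySem.Dict.getD_modify]
          by_cases hc : c = cur
          · rw [if_pos hc, hremove, (h3 cur).mem_erase_iff, hc]
            simp [hbx, h5 b cur]
          · rw [if_neg hc]
            exact h5 b c
        · intro c
          rw [PySem.Dict.getD_modify]
          by_cases hc : c = cur
          · rw [if_pos hc, hremove]
            exact (h3 cur).not_mem_erase
          · rw [if_neg hc]
            exact hxonly c hc
  · -- x is a new ball
    have hx' : l.contains x = false := by simpa using hx
    have hget : l.get? x = none := by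
      rw [PySem.Dict.contains_eq_isSome_get?] at hx'
      simpa using hx'
    refine ⟨d.modify y [] (fun L => L ++ [x]), ?_, ?_⟩
    · intro ret i
      simp only [stepA]
      rw [← hxdef, ← hydef]
      simp [hx']
    · refine pv_tail d l x y h1 h2 h3 h4 (fun b c _ => h5 b c) ?_
      intro c hmem
      have hcon := (h5 x c).mpr hmem
      rw [hget] at hcon
      simp at hcon

-- the whole loops, started from states related by SimInv, produce the same output list
theorem pv_loop_eq (qs : List (List Int)) :
    ∀ (d : PySem.Dict Int (List Int)) (l : PySem.Dict Int Int) (res : List Int),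
      SimInv d l →
      ((PySem.List.enumerate qs (res.length : Int)).foldl stepA
          (d, l, res ++ List.replicate qs.length (0 : Int))).2.2
        = (qs.foldl stepB (l, res)).2 := by
  induction qs with
  | nil => intro d l res _; simp [PySem.List.enumerate]
  | cons q qs ih =>
    intro d l res hinv
    obtain ⟨d', hA, hinv'⟩ := pv_step d l q hinv
    set x := (PySem.List.pyGet? q 0).getD 0
    set y := (PySem.List.pyGet? q 1).getD 0
    have hB : stepB (l, res) q
        = (l.insert x y, res ++ [PySem.Set.len (PySem.Set.ofList (l.insert x y).values)]) := rfl
    rw [PySem.List.enumerate_cons, List.foldl_cons, List.foldl_cons, hA, hB]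
    have hval : (d'.size : Int) = PySem.Set.len (PySem.Set.ofList (l.insert x y).values) :=
      pv_count d' (l.insert x y) hinv'
    have hset : (res ++ List.replicate (q :: qs).length (0 : Int)).set
        ((res.length : Int)).toNat (d'.size : Int)
        = (res ++ [(d'.size : Int)]) ++ List.replicate qs.length (0 : Int) := by
      rw [List.length_cons, List.replicate_succ, Int.toNat_natCast,
          List.set_append_right _ _ (le_refl _)]
      simp
    rw [hset, hval]
    have hstart : (res.length : Int) + 1
        = (((res ++ [PySem.Set.len (PySem.Set.ofList (l.insert x y).values)]).length : Nat) : Int) := by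
      simp
    rw [hstart]
    exact ih d' (l.insert x y) _ hinv'

-- ===== VERDICT (by name: the statement is the Claim_ definition above) =====
theorem queryResults_spec : Claim_equal_queryResults := by
  intro limit queries _ _
  unfold Spec_queryResults queryResults queryResults_alt
  have := pv_loop_eq queries PySem.Dict.empty PySem.Dict.empty []
    (by
      refine ⟨PySem.Dict.nodup_keys_empty, PySem.Dict.nodup_keys_empty, ?_, ?_, ?_⟩
      · intro c; simp [PySem.Dict.getD_empty]
      · intro c hc; simp [PySem.Dict.contains_empty] at hc
      · intro b c; simp [PySem.Dict.get?_empty])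
  simpa using this
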